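-- pv_equiv track=rewrite | github.com/itsshivampal/Concept-Prerequiste-Learning | Proposed Method/Exp 2/concept_ranking.py | get_section_data
-- ===== SOURCE A (Python) =====
-- def get_section_data(section_list):
--     section_data = {}
--     for i in range(len(section_list)):
--         current_collection = []
--         flag = 0
--         for j in range(i+1, len(section_list)):
--             x1 = len(section_list[i].split("."))
--             x2 = len(section_list[j].split("."))
--             if x2 > x1:
--                 current_collection.append(section_list[j])
--             else:
--                 section = section_list[i]
--                 section_data[section] = "|".join(current_collection)
--                 flag = 1
--                 break
--         if flag == 0:
--             section = section_list[i]
--             section_data[section] = "|".join(current_collection)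
--
--     return section_data
-- ===== SOURCE B (Python) =====
-- def get_section_data(section_list):
--     # One left-to-right pass with a stack of open indices: index i closes at the
--     # first later j whose depth is <= depth[i]; its value is the slice in between.
--     n = len(section_list)
--     depth = [len(s.split(".")) for s in section_list]
--     close = [n] * n
--     stack = []
--     for j in range(n):
--         while stack and depth[j] <= depth[stack[-1]]:
--             close[stack.pop()] = j
--         stack.append(j)
--     return {section_list[i]: "|".join(section_list[i + 1:close[i]]) for i in range(n)}
-- ===== Notes on version B (the rewrite author's own statement) =====
-- stated objective: alternative
-- what changed: Replaces the per-index forward rescan (nested loop with break) by one left-to-right pass with a monotonic stack that records each section's closing index, then builds the dict from slices.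
import Mathlib
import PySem

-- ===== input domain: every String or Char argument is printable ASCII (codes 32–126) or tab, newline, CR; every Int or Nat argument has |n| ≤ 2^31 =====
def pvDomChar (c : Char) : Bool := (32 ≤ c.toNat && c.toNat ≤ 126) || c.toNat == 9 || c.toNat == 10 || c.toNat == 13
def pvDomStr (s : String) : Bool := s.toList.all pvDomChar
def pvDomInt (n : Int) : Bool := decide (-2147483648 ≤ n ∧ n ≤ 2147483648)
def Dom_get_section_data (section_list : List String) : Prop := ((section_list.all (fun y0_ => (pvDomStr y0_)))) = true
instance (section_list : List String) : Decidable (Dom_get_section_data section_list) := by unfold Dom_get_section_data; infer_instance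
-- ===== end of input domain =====

-- B replaces A's per-index forward rescan by one left-to-right pass with a monotonic stack of open indices (an alternative algorithm; shared output-building cost dominates).

-- ===== PORT A =====
-- depth of a section heading = len(s.split(".")); "." ≠ "" so PySem.Str.split? is exact (some)
def depS (s : String) : Nat := ((PySem.Str.split? s ".").getD []).length

-- A's inner j-loop: append section_list[j] while deeper (x2 > x1), break otherwise
def aCollect (sl : List String) (x1 : Nat) (j : Nat) (acc : List String) : List String :=
  if _h : j < sl.length then
    if x1 < depS (sl.getD j "") then aCollect sl x1 (j + 1) (acc ++ [sl.getD j ""])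
    else acc
  else acc
termination_by sl.length - j

-- A inserts section_data[section_list[i]] once per i (at the break, or after the loop when flag = 0),
-- with the same value "|".join(current_collection) on both paths.
def get_section_data (section_list : List String) : List (String × String) :=
  ((List.range section_list.length).foldl (fun d i =>
      let x1 := depS (section_list.getD i "")
      let coll := aCollect section_list x1 (i + 1) []
      d.insert (section_list.getD i "") (PySem.Str.join "|" coll))
    PySem.Dict.empty).items

-- ===== PORT B =====
-- B's while loop: pop open indices whose depth is reached, recording their closing index j
def bPop (depth : List Nat) (j : Nat) : List Nat → List Nat → List Nat × List Nat
  | [], close => ([], close)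
  | i :: rest, close =>
    if depth.getD j 0 ≤ depth.getD i 0 then bPop depth j rest (close.set i j)
    else (i :: rest, close)

def get_section_data_alt (section_list : List String) : List (String × String) :=
  let n := section_list.length
  let depth := section_list.map depS
  let final := (List.range n).foldl (fun (p : List Nat × List Nat) j =>
      let q := bPop depth j p.1 p.2
      (j :: q.1, q.2)) ([], List.replicate n n)
  ((List.range n).foldl (fun d i =>
      d.insert (section_list.getD i "")
        (PySem.Str.join "|" (PySem.List.slice section_list (some ((i + 1 : Nat) : Int)) (some ((final.2.getD i 0 : Nat) : Int)))))
    PySem.Dict.empty).items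

-- ===== PRECONDITION & SPEC =====
def Spec_get_section_data (section_list : List String) (out : List (String × String)) : Prop := out = get_section_data_alt section_list
instance (section_list : List String) (out : List (String × String)) : Decidable (Spec_get_section_data section_list out) := by unfold Spec_get_section_data; infer_instance

-- ===== CLAIM (what is proved, stated in full; the proofs are below) =====
def Claim_equal_get_section_data : Prop := ∀ (section_list : List String), Dom_get_section_data section_list → Spec_get_section_data section_list (get_section_data section_list)

-- ===== LEMMAS AND PROOFS =====

-- depth of section i, the strictly-deeper run after i, and i's closing index C
def dep (sl : List String) (i : Nat) : Nat := depS (sl.getD i "")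
def tw (sl : List String) (i : Nat) : List String := (sl.drop (i + 1)).takeWhile (fun s => decide (dep sl i < depS s))
def C (sl : List String) (i : Nat) : Nat := i + 1 + (tw sl i).length

-- element after a takeWhile prefix fails the predicate
lemma not_pred_after_takeWhile {α : Type} (l : List α) (p : α → Bool)
    (h : (l.takeWhile p).length < l.length) : ¬ p (l[(l.takeWhile p).length]'h) = true := by
  induction l with
  | nil => simp at h
  | cons x xs ih =>
    by_cases hp : p x
    · simp only [List.takeWhile_cons, hp, if_true, List.length_cons] at h ⊢
      have h' : (List.takeWhile p xs).length < xs.length := by omega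
      simpa [List.getElem_cons_succ] using ih h'
    · simp [hp] at h ⊢

-- element inside a takeWhile prefix satisfies the predicate
lemma pred_inside_takeWhile {α : Type} (l : List α) (p : α → Bool) (k : Nat)
    (hk : k < (l.takeWhile p).length) (hl : k < l.length) : p (l[k]'hl) = true := by
  have h2 : (l.takeWhile p)[k]'hk = l[k]'hl := List.IsPrefix.getElem (List.takeWhile_prefix p) hk
  rw [← h2]
  exact List.mem_takeWhile_imp (List.getElem_mem hk)

lemma C_gt (sl : List String) (i : Nat) : i < C sl i := by
  unfold C; omega

lemma tw_len_le (sl : List String) (i : Nat) : (tw sl i).length ≤ sl.length - (i + 1) := by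
  have h := (List.takeWhile_prefix (l := sl.drop (i + 1)) (fun s => decide (dep sl i < depS s))).length_le
  simpa [tw] using h

lemma C_le (sl : List String) (i : Nat) (h : i < sl.length) : C sl i ≤ sl.length := by
  have := tw_len_le sl i
  unfold C; omega

lemma aCollect_eq (sl : List String) (x1 : Nat) (j : Nat) (acc : List String) :
    aCollect sl x1 j acc = acc ++ (sl.drop j).takeWhile (fun s => decide (x1 < depS s)) := by
  induction j, acc using aCollect.induct (sl := sl) (x1 := x1) with
  | case1 j acc h hd ih =>
    have hg : sl.getD j "" = sl[j] := List.getD_eq_getElem sl "" h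
    rw [aCollect, dif_pos h, if_pos hd, ih, List.drop_eq_getElem_cons h, List.takeWhile_cons,
      if_pos (by rw [← hg]; simpa using hd)]
    simp [List.getElem?_eq_getElem h]
  | case2 j acc h hd =>
    have hg : sl.getD j "" = sl[j] := List.getD_eq_getElem sl "" h
    rw [aCollect, dif_pos h, if_neg hd, List.drop_eq_getElem_cons h, List.takeWhile_cons,
      if_neg (by rw [← hg]; simpa using hd)]
    simp
  | case3 j acc h =>
    rw [aCollect, dif_neg h, List.drop_eq_nil_of_le (by omega)]
    simp

lemma dep_lt_of_lt_C (sl : List String) {b a : Nat} (hba : b < a) (ha : a < C sl b) (han : a < sl.length) :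
    dep sl b < dep sl a := by
  have hk : a - (b + 1) < (tw sl b).length := by unfold C at ha; omega
  have hl : a - (b + 1) < (sl.drop (b + 1)).length := by simp [List.length_drop]; omega
  have hp := pred_inside_takeWhile (sl.drop (b + 1)) (fun s => decide (dep sl b < depS s)) (a - (b + 1)) (by simpa [tw] using hk) hl
  have hel : (sl.drop (b + 1))[a - (b + 1)]'hl = sl[a]'han := by
    rw [List.getElem_drop]
    congr 1
    omega
  rw [hel] at hp
  have hga : sl.getD a "" = sl[a]'han := List.getD_eq_getElem sl "" han
  simp only [dep, hga]
  simpa using hp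

lemma C_eq_of_stop (sl : List String) {i j : Nat} (hij : i < j) (hj : j < sl.length)
    (hopen : j ≤ C sl i) (hstop : ¬ dep sl i < dep sl j) : C sl i = j := by
  rcases Nat.lt_or_ge j (C sl i) with h | h
  · exact absurd (dep_lt_of_lt_C sl hij h hj) hstop
  · omega

lemma C_succ_le_of_deeper (sl : List String) {i j : Nat} (hij : i < j) (hj : j < sl.length)
    (hopen : j ≤ C sl i) (hdeep : dep sl i < dep sl j) : j + 1 ≤ C sl i := by
  rcases Nat.lt_or_ge j (C sl i) with h | h
  · omega
  · exfalso
    have hCj : C sl i = j := by omega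
    have hk : (((sl.drop (i + 1)).takeWhile (fun s => decide (dep sl i < depS s))).length) < (sl.drop (i + 1)).length := by
      have : (tw sl i).length = j - (i + 1) := by unfold C at hCj; omega
      simp only [tw] at this
      simp [List.length_drop, this]; omega
    have hnp := not_pred_after_takeWhile (sl.drop (i + 1)) (fun s => decide (dep sl i < depS s)) hk
    have hlen : (((sl.drop (i + 1)).takeWhile (fun s => decide (dep sl i < depS s))).length) = j - (i + 1) := by
      have : (tw sl i).length = j - (i + 1) := by unfold C at hCj; omega
      simpa [tw] using this
    have hel : (sl.drop (i + 1))[((sl.drop (i + 1)).takeWhile (fun s => decide (dep sl i < depS s))).length]'hk = sl[j]'hj := by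
      rw [List.getElem_drop]
      have hidx : i + 1 + ((sl.drop (i + 1)).takeWhile (fun s => decide (dep sl i < depS s))).length = j := by omega
      simp_rw [hidx]
    rw [hel] at hnp
    have hgj : sl.getD j "" = sl[j]'hj := List.getD_eq_getElem sl "" hj
    apply hnp
    simp only [dep, hgj] at hdeep
    simpa using hdeep

lemma depth_getD (sl : List String) {m : Nat} (hm : m < sl.length) :
    (sl.map depS).getD m 0 = dep sl m := by
  rw [List.getD_eq_getElem?_getD, List.getElem?_map, List.getElem?_eq_getElem hm]
  simp only [Option.map_some, Option.getD_some]
  unfold dep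
  rw [List.getD_eq_getElem sl "" hm]

lemma bPop_spec (sl : List String) (j : Nat) (hj : j < sl.length) :
    ∀ (st close : List Nat),
    (∀ i ∈ st, i < j ∧ j ≤ C sl i) →
    st.Pairwise (fun a b => dep sl b < dep sl a) →
    close.length = sl.length →
    (∀ k, k < sl.length → close.getD k 0 = if C sl k < j ∨ (C sl k = j ∧ k ∉ st) then C sl k else sl.length) →
    (bPop (sl.map depS) j st close).1 = st.filter (fun i => decide (j + 1 ≤ C sl i)) ∧
    (bPop (sl.map depS) j st close).2.length = sl.length ∧
    ∀ k, k < sl.length → (bPop (sl.map depS) j st close).2.getD k 0 = if C sl k < j + 1 then C sl k else sl.length := by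
  intro st
  induction st with
  | nil =>
    intro close _ _ hlen hcl
    simp only [bPop]
    refine ⟨List.filter_nil.symm ▸ rfl, hlen, ?_⟩
    intro k hk
    rw [hcl k hk]
    by_cases h1 : C sl k < j + 1
    · rw [if_pos (by simp only [List.not_mem_nil, not_false_iff, and_true]; omega), if_pos h1]
    · rw [if_neg (by simp only [List.not_mem_nil, not_false_iff, and_true]; omega), if_neg h1]
  | cons i rest ih =>
    intro close hmem hdec hlen hcl
    have hi := hmem i (List.mem_cons_self ..)
    have hin : i < sl.length := lt_trans hi.1 hj
    simp only [bPop]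
    by_cases hcond : (sl.map depS).getD j 0 ≤ (sl.map depS).getD i 0
    · -- pop: section i closes at j
      rw [if_pos hcond]
      rw [depth_getD sl hj, depth_getD sl hin] at hcond
      have hCi : C sl i = j := C_eq_of_stop sl hi.1 hj hi.2 (by omega)
      have hnotmem : i ∉ rest := fun hmem' =>
        absurd (List.rel_of_pairwise_cons hdec hmem') (lt_irrefl _)
      have hcl' : ∀ k, k < sl.length → (close.set i j).getD k 0 =
          if C sl k < j ∨ (C sl k = j ∧ k ∉ rest) then C sl k else sl.length := by
        intro k hk
        by_cases hki : k = i
        · subst hki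
          have hset : (close.set k j).getD k 0 = j := by
            rw [List.getD_eq_getElem?_getD, List.getElem?_set, if_pos rfl, if_pos (by omega)]
            rfl
          rw [hset, if_pos (Or.inr ⟨hCi, hnotmem⟩), hCi]
        · have hset : (close.set i j).getD k 0 = close.getD k 0 := by
            rw [List.getD_eq_getElem?_getD, List.getElem?_set, if_neg (fun h => hki h.symm),
              ← List.getD_eq_getElem?_getD]
          rw [hset, hcl k hk]
          have : (C sl k < j ∨ (C sl k = j ∧ k ∉ i :: rest)) ↔ (C sl k < j ∨ (C sl k = j ∧ k ∉ rest)) := by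
            simp [List.mem_cons, hki]
          rw [if_congr this rfl rfl]
      obtain ⟨h1', h2', h3'⟩ := ih (close.set i j)
        (fun b hb => hmem b (List.mem_cons_of_mem _ hb))
        (List.Pairwise.of_cons hdec)
        (by simpa using hlen)
        hcl'
      refine ⟨?_, h2', h3'⟩
      rw [h1', List.filter_cons_of_neg (by simp [hCi])]
    · -- keep: everything on the stack stays open at j + 1
      rw [if_neg hcond]
      rw [depth_getD sl hj, depth_getD sl hin] at hcond
      have hall : ∀ b ∈ i :: rest, j + 1 ≤ C sl b := by
        intro b hb
        have hb' := hmem b hb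
        have hdb : dep sl b < dep sl j := by
          rcases List.mem_cons.mp hb with h | h
          · subst h; omega
          · have := List.rel_of_pairwise_cons hdec h
            omega
        exact C_succ_le_of_deeper sl hb'.1 hj hb'.2 hdb
      refine ⟨?_, hlen, ?_⟩
      · exact (List.filter_eq_self.mpr (fun b hb => by simpa using hall b hb)).symm
      · intro k hk
        rw [hcl k hk]
        by_cases h1 : C sl k < j + 1
        · have hc : C sl k < j ∨ (C sl k = j ∧ k ∉ i :: rest) := by
            rcases Nat.lt_or_ge (C sl k) j with h | h
            · exact Or.inl h
            · have hkj : C sl k = j := by omega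
              refine Or.inr ⟨hkj, fun hmem' => ?_⟩
              have := hall k hmem'
              omega
          rw [if_pos hc, if_pos h1]
        · have hc : ¬ (C sl k < j ∨ (C sl k = j ∧ k ∉ i :: rest)) := by
            rintro (h | ⟨h, _⟩) <;> omega
          rw [if_neg hc, if_neg h1]

lemma filter_close_singleton (sl : List String) (j : Nat) :
    (List.filter (fun i => decide (j + 1 ≤ C sl i)) [j]) = [j] := by
  have := C_gt sl j
  simp only [List.filter_cons, List.filter_nil, decide_eq_true_eq]
  rw [if_pos (by omega)]

lemma foldB (sl : List String) (j : Nat) (hj : j ≤ sl.length) :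
    ((List.range j).foldl (fun (p : List Nat × List Nat) j =>
        let q := bPop (sl.map depS) j p.1 p.2
        (j :: q.1, q.2)) ([], List.replicate sl.length sl.length)).1
      = ((List.range j).filter (fun i => decide (j ≤ C sl i))).reverse ∧
    ((List.range j).foldl (fun (p : List Nat × List Nat) j =>
        let q := bPop (sl.map depS) j p.1 p.2
        (j :: q.1, q.2)) ([], List.replicate sl.length sl.length)).2.length = sl.length ∧
    ∀ k, k < sl.length →
      ((List.range j).foldl (fun (p : List Nat × List Nat) j =>
          let q := bPop (sl.map depS) j p.1 p.2
          (j :: q.1, q.2)) ([], List.replicate sl.length sl.length)).2.getD k 0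
        = if C sl k < j then C sl k else sl.length := by
  induction j with
  | zero =>
    refine ⟨by simp, by simp, ?_⟩
    intro k hk
    simp [List.getD_eq_getElem?_getD, hk]
  | succ j ihj =>
    have hjn : j < sl.length := by omega
    obtain ⟨hs1, hs2, hs3⟩ := ihj (by omega)
    rw [List.range_succ, List.foldl_append, List.foldl_cons, List.foldl_nil]
    set s := ((List.range j).foldl (fun (p : List Nat × List Nat) j =>
        let q := bPop (sl.map depS) j p.1 p.2
        (j :: q.1, q.2)) ([], List.replicate sl.length sl.length)) with hs
    have hmem : ∀ i ∈ s.1, i < j ∧ j ≤ C sl i := by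
      intro i hi
      rw [hs1] at hi
      simp only [List.mem_reverse, List.mem_filter, List.mem_range, decide_eq_true_eq] at hi
      exact hi
    have hdec : s.1.Pairwise (fun a b => dep sl b < dep sl a) := by
      rw [hs1, List.pairwise_reverse]
      have hp : ((List.range j).filter (fun i => decide (j ≤ C sl i))).Pairwise (· < ·) :=
        List.Pairwise.filter _ List.pairwise_lt_range
      refine hp.imp_of_mem ?_
      intro a b ha hb hab
      simp only [List.mem_filter, List.mem_range, decide_eq_true_eq] at ha hb
      exact dep_lt_of_lt_C sl hab (lt_of_lt_of_le hb.1 ha.2) (lt_trans hb.1 hjn)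
    have hcl : ∀ k, k < sl.length → s.2.getD k 0 =
        if C sl k < j ∨ (C sl k = j ∧ k ∉ s.1) then C sl k else sl.length := by
      intro k hk
      rw [hs3 k hk]
      by_cases h1 : C sl k < j
      · rw [if_pos h1, if_pos (Or.inl h1)]
      · rw [if_neg h1, if_neg ?_]
        rintro (h | ⟨hEq, hnm⟩)
        · omega
        · apply hnm
          rw [hs1]
          have hkj : k < j := by have := C_gt sl k; omega
          simp only [List.mem_reverse, List.mem_filter, List.mem_range, decide_eq_true_eq]
          omega
    obtain ⟨hb1, hb2, hb3⟩ := bPop_spec sl j hjn s.1 s.2 hmem hdec hs2 hcl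
    refine ⟨?_, hb2, ?_⟩
    · show j :: (bPop (sl.map depS) j s.1 s.2).1 = _
      rw [hb1, hs1, List.filter_reverse, List.filter_filter, List.filter_append, filter_close_singleton sl j,
        List.reverse_append]
      simp only [List.reverse_cons, List.reverse_nil, List.nil_append, List.cons_append,
        List.cons.injEq, true_and]
      congr 1
      apply List.filter_congr
      intro x hx
      simp only [List.mem_range] at hx
      by_cases h : j + 1 ≤ C sl x
      · simp [h, Nat.le_of_succ_le h]
      · simp [h]
    · intro k hk
      exact hb3 k hk

lemma value_eq (sl : List String) (i : Nat) (hi : i < sl.length) :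
    PySem.List.slice sl (some ((i + 1 : Nat) : Int))
        (some (((if C sl i < sl.length then C sl i else sl.length) : Nat) : Int))
      = aCollect sl (depS (sl.getD i "")) (i + 1) [] := by
  have hc : (if C sl i < sl.length then C sl i else sl.length) = C sl i := by
    have := C_le sl i hi
    split_ifs <;> omega
  rw [hc, PySem.List.slice_natCast, aCollect_eq]
  simp only [List.nil_append]
  have hlen : C sl i - (i + 1) = (tw sl i).length := by unfold C; omega
  rw [hlen]
  simp only [tw, dep]
  exact (List.prefix_iff_eq_take.mp (List.takeWhile_prefix _)).symm

lemma ports_eq (sl : List String) : get_section_data sl = get_section_data_alt sl := by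
  obtain ⟨-, -, h3⟩ := foldB sl sl.length le_rfl
  simp only [get_section_data, get_section_data_alt]
  congr 1
  apply PySem.List.foldl_congr_mem
  intro acc i hi
  simp only [List.mem_range] at hi
  rw [h3 i hi, value_eq sl i hi]

-- ===== VERDICT (by name: the statement is the Claim_ definition above) =====
theorem get_section_data_spec : Claim_equal_get_section_data := by
  intro section_list _
  exact ports_eq section_list
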